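-- pv_equiv track=rewrite | github.com/morrisalp/fidelity | fidelity/converter.py | ascii2units
-- ===== SOURCE A (Python) =====
-- def ascii2units(ascii_string):
--     if ascii_string == "":
--         return []
--     if ascii_string[0] == " ":
--         return [" "] + ascii2units(ascii_string[1:])
--     if ascii_string[1] == "W":
--         # labialized, so unit is 3 characters long (e.g. gWa)
--         assert len(ascii_string) >= 3
--         return [ascii_string[0:3]] + ascii2units(ascii_string[3:])
--     # normal two-character unit
--     assert len(ascii_string) >= 2
--     return [ascii_string[0:2]] + ascii2units(ascii_string[2:])
-- ===== SOURCE B (Python) =====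
-- def ascii2units(ascii_string):
--     units = []
--     i = 0
--     n = len(ascii_string)
--     while i < n:
--         if ascii_string[i] == " ":
--             step = 1
--         elif i + 1 < n and ascii_string[i + 1] == "W":
--             step = 3
--         else:
--             step = 2
--         units.append(ascii_string[i:i + step])
--         i += step
--     return units
-- ===== Notes on version B (the rewrite author's own statement) =====
-- stated objective: simpler
-- what changed: Replaces the list-concatenating tail recursion (which rebuilds a slice of the string at every step) by a single iterative index loop that appends each 1/2/3-char slice to an accumulator; no recursion and no repeated tail-slicing.
-- outside the precondition, e.g. on ascii2units('W'): A raises IndexError, B returns ['W']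
import Mathlib
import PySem

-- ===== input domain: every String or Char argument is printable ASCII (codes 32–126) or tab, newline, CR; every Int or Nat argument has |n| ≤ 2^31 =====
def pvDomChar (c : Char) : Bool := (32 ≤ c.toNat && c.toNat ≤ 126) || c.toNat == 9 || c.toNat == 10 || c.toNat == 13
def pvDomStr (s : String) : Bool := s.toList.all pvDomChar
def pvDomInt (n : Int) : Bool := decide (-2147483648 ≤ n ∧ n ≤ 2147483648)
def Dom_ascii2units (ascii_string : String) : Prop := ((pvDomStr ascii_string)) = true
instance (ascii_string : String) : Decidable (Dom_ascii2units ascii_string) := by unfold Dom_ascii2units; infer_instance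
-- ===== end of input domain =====

-- B replaces A's list-concatenating tail recursion by a single iterative index loop with an
-- accumulator (simpler decomposition); return-value equivalence is proved on Pre_ (A's non-raising inputs).

-- ===== PORT A =====
-- literal transliteration of A's recursion on the character list; where the Python RAISES
-- (IndexError on ascii_string[1] for a lone trailing non-space char, AssertionError on a
-- 2-char chunk whose second char is 'W') the port returns []; Pre_ excludes those inputs.
def ascii2unitsGo : List Char → List String
  | [] => []
  | c :: rest =>
    if c = ' ' then " " :: ascii2unitsGo rest
    else
      match rest with
      | [] => []            -- Python: IndexError on ascii_string[1]
      | d :: rest2 =>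
        if d = 'W' then
          match rest2 with
          | [] => []        -- Python: assert len(ascii_string) >= 3 fails
          | e :: rest3 => String.mk [c, d, e] :: ascii2unitsGo rest3
        else String.mk [c, d] :: ascii2unitsGo rest2

def ascii2units (ascii_string : String) : List String :=
  ascii2unitsGo ascii_string.toList

-- ===== PORT B =====
-- transliteration of Source B's while-loop: index i over the characters, appending each
-- 1/2/3-character slice (Python's clamping slice = drop/take) to the accumulator.
def ascii2unitsLoop (l : List Char) (n : Nat) (i : Nat) (units : List String) : List String :=
  if _h : i < n then
    if l.getD i ' ' = ' ' then
      ascii2unitsLoop l n (i + 1) (units ++ [String.mk ((l.drop i).take 1)])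
    else if i + 1 < n ∧ l.getD (i + 1) ' ' = 'W' then
      ascii2unitsLoop l n (i + 3) (units ++ [String.mk ((l.drop i).take 3)])
    else
      ascii2unitsLoop l n (i + 2) (units ++ [String.mk ((l.drop i).take 2)])
  else units
termination_by n - i
decreasing_by all_goals omega

def ascii2units_alt (ascii_string : String) : List String :=
  ascii2unitsLoop ascii_string.toList ascii_string.toList.length 0 []

-- ===== PRECONDITION & SPEC =====
-- Pre_ admits exactly the strings on which A returns: concatenations of single-space tokens,
-- 2-char units (first char non-space, second char not 'W') and 3-char units (first char
-- non-space, second char 'W') — a token-grammar membership check on the input shape.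
def okUnits (l : List Char) : Bool := match l with | [] => true | c :: rest => if c = ' ' then okUnits rest else match rest with | [] => false | d :: rest2 => if d = 'W' then (match rest2 with | [] => false | _ :: rest3 => okUnits rest3) else okUnits rest2

def Pre_ascii2units (ascii_string : String) : Prop := okUnits ascii_string.toList = true
instance (ascii_string : String) : Decidable (Pre_ascii2units ascii_string) := by
  unfold Pre_ascii2units; infer_instance

def pvWitness_ascii2units : String := "gWa ba"

def Spec_ascii2units (ascii_string : String) (out : List String) : Prop := out = ascii2units_alt ascii_string
instance (ascii_string : String) (out : List String) : Decidable (Spec_ascii2units ascii_string out) := by unfold Spec_ascii2units; infer_instance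

-- ===== CLAIM (what is proved, stated in full; the proofs are below) =====
def Claim_equal_ascii2units : Prop := ∀ (ascii_string : String), Dom_ascii2units ascii_string → Pre_ascii2units ascii_string → Spec_ascii2units ascii_string (ascii2units ascii_string)


-- ===== LEMMAS AND PROOFS =====

theorem okUnits_space (rest : List Char) : okUnits (' ' :: rest) = okUnits rest := by
  rw [okUnits.eq_def]; simp

theorem okUnits_one (c : Char) (hc : c ≠ ' ') : okUnits [c] = false := by
  rw [okUnits.eq_def]; simp [hc]

theorem okUnits_two_W (c : Char) (hc : c ≠ ' ') : okUnits [c, 'W'] = false := by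
  rw [okUnits.eq_def]; simp [hc]

theorem okUnits_W (c e : Char) (rest : List Char) (hc : c ≠ ' ') :
    okUnits (c :: 'W' :: e :: rest) = okUnits rest := by
  rw [okUnits.eq_def]; simp [hc]

theorem okUnits_two (c d : Char) (rest : List Char) (hc : c ≠ ' ') (hd : d ≠ 'W') :
    okUnits (c :: d :: rest) = okUnits rest := by
  rw [okUnits.eq_def]; simp [hc, hd]

theorem goA_space (rest : List Char) :
    ascii2unitsGo (' ' :: rest) = " " :: ascii2unitsGo rest := by
  rw [ascii2unitsGo.eq_def]; simp

theorem goA_W (c e : Char) (rest : List Char) (hc : c ≠ ' ') :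
    ascii2unitsGo (c :: 'W' :: e :: rest) = String.mk [c, 'W', e] :: ascii2unitsGo rest := by
  rw [ascii2unitsGo.eq_def]; simp [hc]

theorem goA_two (c d : Char) (rest : List Char) (hc : c ≠ ' ') (hd : d ≠ 'W') :
    ascii2unitsGo (c :: d :: rest) = String.mk [c, d] :: ascii2unitsGo rest := by
  rw [ascii2unitsGo.eq_def]; simp [hc, hd]

theorem mk_space : String.mk [' '] = " " := rfl

-- the loop starting at index i produces the accumulator followed by A's recursion on the suffix
theorem ascii2unitsLoop_drop (l : List Char) :
    ∀ (k i : Nat) (units : List String), l.length - i ≤ k → okUnits (l.drop i) = true →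
      ascii2unitsLoop l l.length i units = units ++ ascii2unitsGo (l.drop i) := by
  intro k
  induction k with
  | zero =>
      intro i units hk _
      have hge : l.length ≤ i := by omega
      rw [ascii2unitsLoop]
      simp [Nat.not_lt.mpr hge, List.drop_eq_nil_of_le hge, ascii2unitsGo]
  | succ k ih =>
      intro i units hk hok
      by_cases h : i < l.length
      · have hdrop : l.drop i = l[i] :: l.drop (i + 1) := List.drop_eq_getElem_cons h
        have hgd : l.getD i ' ' = l[i] := List.getD_eq_getElem l ' ' h
        rw [ascii2unitsLoop]
        by_cases hc : l[i] = ' '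
        · -- single-space unit
          have hok1 : okUnits (l.drop (i + 1)) = true := by
            rw [hdrop, hc, okUnits_space] at hok; exact hok
          rw [dif_pos h, if_pos (by rw [hgd]; exact hc)]
          rw [ih (i + 1) _ (by omega) hok1, hdrop, hc, goA_space]
          simp [mk_space]
        · -- non-space: the grammar forces a second char
          have h1 : i + 1 < l.length := by
            by_contra hnot
            have hnil : l.drop (i + 1) = [] := List.drop_eq_nil_of_le (by omega)
            rw [hdrop, hnil, okUnits_one _ hc] at hok
            exact absurd hok (by simp)
          have hdrop1 : l.drop (i + 1) = l[i + 1] :: l.drop (i + 2) :=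
            List.drop_eq_getElem_cons h1
          have hgd1 : l.getD (i + 1) ' ' = l[i + 1] := List.getD_eq_getElem l ' ' h1
          rw [dif_pos h, if_neg (by rw [hgd]; exact hc)]
          by_cases hw : l[i + 1] = 'W'
          · -- labialized 3-char unit: the grammar forces a third char
            have h2 : i + 2 < l.length := by
              by_contra hnot
              have hnil : l.drop (i + 2) = [] := List.drop_eq_nil_of_le (by omega)
              rw [hdrop, hdrop1, hw, hnil, okUnits_two_W _ hc] at hok
              exact absurd hok (by simp)
            have hdrop2 : l.drop (i + 2) = l[i + 2] :: l.drop (i + 3) :=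
              List.drop_eq_getElem_cons h2
            have hok3 : okUnits (l.drop (i + 3)) = true := by
              rw [hdrop, hdrop1, hdrop2, hw, okUnits_W _ _ _ hc] at hok; exact hok
            rw [if_pos ⟨h1, by rw [hgd1]; exact hw⟩]
            rw [ih (i + 3) _ (by omega) hok3]
            have ht : List.take 1 (List.drop (i + 2) l) = [l[i + 2]] := by rw [hdrop2]; rfl
            rw [hdrop, hdrop1, hdrop2, hw, goA_W _ _ _ hc]
            simp [ht]
          · -- normal 2-char unit
            have hok2 : okUnits (l.drop (i + 2)) = true := by
              rw [hdrop, hdrop1, okUnits_two _ _ _ hc hw] at hok; exact hok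
            rw [if_neg (by rintro ⟨-, hW⟩; exact hw (by rwa [hgd1] at hW))]
            rw [ih (i + 2) _ (by omega) hok2]
            have ht : List.take 2 (List.drop i l) = [l[i], l[i + 1]] := by rw [hdrop, hdrop1]; rfl
            rw [hdrop, hdrop1, goA_two _ _ _ hc hw]
            simp [ht]
      · rw [ascii2unitsLoop]
        simp [h, List.drop_eq_nil_of_le (Nat.le_of_not_lt h), ascii2unitsGo]

-- ===== VERDICT (by name: the statement is the Claim_ definition above) =====
theorem ascii2units_spec : Claim_equal_ascii2units := by
  intro s _ hpre
  unfold Spec_ascii2units ascii2units ascii2units_alt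
  have := ascii2unitsLoop_drop s.toList s.toList.length 0 [] (by omega)
      (by simpa [Pre_ascii2units] using hpre)
  simpa using this.symm
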